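-- pv_equiv track=rewrite | github.com/jongko54/webEmbedding | bundle/source-first-clone/mcp/source_first_clone/rebuild_scaffold.py | _collect_url_values
-- ===== SOURCE A (Python) =====
-- def _collect_url_values(values: list[str | None], limit: int = 8) -> list[str]:
--     seen: list[str] = []
--     for value in values:
--         if not value:
--             continue
--         cleaned = " ".join(str(value).split())
--         if cleaned and cleaned not in seen:
--             seen.append(cleaned)
--         if len(seen) >= limit:
--             break
--     return seen
-- ===== SOURCE B (Python) =====
-- def _collect_url_values(values: list[str | None], limit: int = 8) -> list[str]:
--     cleaned = [c for c in (" ".join(str(v).split()) for v in values if v) if c]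
--
--     def first_runs(seq: list[str]) -> list[str]:
--         # take the front element, then drop every copy of it from the remainder:
--         # deduplication by repeatedly filtering the tail, no 'seen' lookup structure
--         out: list[str] = []
--         while seq:
--             head = seq[0]
--             out.append(head)
--             seq = [c for c in seq[1:] if c != head]
--         return out
--
--     return first_runs(cleaned)[:limit]
-- ===== Notes on version B (the rewrite author's own statement) =====
-- stated objective: alternative
-- what changed: Replaces the single accumulate-with-early-break loop carrying a 'seen' list by a staged design: build the cleaned stream, deduplicate it by structural recursion that removes all later copies of the head from the remainder (no seen-set at all), then slice [:limit].
-- outside the precondition, e.g. on _collect_url_values([' a '], 0): A returns ['a'], B returns []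
import Mathlib
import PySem

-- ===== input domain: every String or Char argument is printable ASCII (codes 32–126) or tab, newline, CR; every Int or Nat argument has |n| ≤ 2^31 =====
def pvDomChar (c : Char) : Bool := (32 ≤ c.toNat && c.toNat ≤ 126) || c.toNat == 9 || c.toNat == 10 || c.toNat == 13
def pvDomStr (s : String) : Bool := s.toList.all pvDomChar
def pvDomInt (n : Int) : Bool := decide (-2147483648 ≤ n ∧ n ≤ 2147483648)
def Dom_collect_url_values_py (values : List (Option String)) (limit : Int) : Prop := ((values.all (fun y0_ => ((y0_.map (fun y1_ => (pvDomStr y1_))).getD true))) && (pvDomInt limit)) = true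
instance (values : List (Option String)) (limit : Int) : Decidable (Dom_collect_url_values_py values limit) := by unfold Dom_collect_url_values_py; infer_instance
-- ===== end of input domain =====

-- B stages the work: cleaned stream, then dedup by structural recursion that filters the head
-- out of the remainder (no seen accumulator), then slice [:limit]; same values for every positive limit.


-- " ".join(str(value).split())  (value is a str here, so str(value) = value)
def pvClean (s : String) : String := PySem.Str.join " " (PySem.Str.split₀ s)

-- ===== PORT A =====
-- the loop of A: state 'seen'; 'if not value: continue' (value is None or ""),
-- append when cleaned and cleaned not in seen, break when len(seen) >= limit
def collectA (limit : Int) (seen : List String) : List (Option String) → List String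
  | [] => seen
  | v :: rest =>
    if v.getD "" = "" then collectA limit seen rest      -- 'if not value: continue'
    else
      let cleaned := pvClean (v.getD "")
      let seen' := if cleaned ≠ "" ∧ cleaned ∉ seen then seen ++ [cleaned] else seen
      if (seen'.length : Int) ≥ limit then seen' else collectA limit seen' rest

def collect_url_values_py (values : List (Option String)) (limit : Int) : List String :=
  collectA limit [] values

-- ===== PORT B =====
-- first_runs: while seq: append seq[0] to out, drop every copy of it from the remainder
def pvFirstRunsLoop (out : List String) : List String → List String
  | [] => out
  | c :: cs => pvFirstRunsLoop (out ++ [c]) (cs.filter (fun x => x ≠ c))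
termination_by seq => seq.length
decreasing_by
  simp only [List.length_cons]
  refine Nat.lt_succ_of_le ?_
  have h := List.length_filter_le (fun x : {x // x ∈ cs} => decide (↑x ≠ c)) cs.attach
  simp at h ⊢
  omega

def collect_url_values_py_alt (values : List (Option String)) (limit : Int) : List String :=
  let cleaned := ((values.filter (fun v => v.getD "" ≠ "")).map (fun v => pvClean (v.getD ""))).filter (fun c => c ≠ "")
  PySem.List.slice (pvFirstRunsLoop [] cleaned) none (some limit)

-- ===== PRECONDITION & SPEC =====
-- Pre_ restricts to the natural domain of a positive collection limit: for limit ≤ 0 (outside the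
-- function's purpose) A's early-break quirk can still return one accidental element while B slices;
-- nonpositive limits stay admitted when every value normalizes to "" (both programs return [] there).
def Pre_collect_url_values_py (values : List (Option String)) (limit : Int) : Prop :=
  1 ≤ limit ∨ ∀ v ∈ values, pvClean (v.getD "") = ""
instance (values : List (Option String)) (limit : Int) : Decidable (Pre_collect_url_values_py values limit) := by unfold Pre_collect_url_values_py; infer_instance
def pvWitness_collect_url_values_py : List (Option String) × Int := ([some " a  b ", none, some "", some "a b"], 2)

def Spec_collect_url_values_py (values : List (Option String)) (limit : Int) (out : List String) : Prop := out = collect_url_values_py_alt values limit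
instance (values : List (Option String)) (limit : Int) (out : List String) : Decidable (Spec_collect_url_values_py values limit out) := by unfold Spec_collect_url_values_py; infer_instance

-- ===== CLAIM (what is proved, stated in full; the proofs are below) =====
def Claim_equal_collect_url_values_py : Prop := ∀ (values : List (Option String)) (limit : Int), Dom_collect_url_values_py values limit → Pre_collect_url_values_py values limit → Spec_collect_url_values_py values limit (collect_url_values_py values limit)

-- ===== LEMMAS AND PROOFS =====

-- the cleaned, truthy, nonempty stream that B's first stage produces
def pvStream (values : List (Option String)) : List String :=
  ((values.filter (fun v => v.getD "" ≠ "")).map (fun v => pvClean (v.getD ""))).filter (fun c => c ≠ "")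

-- the recursive form of B's while loop
def pvFirstRuns : List String → List String
  | [] => []
  | c :: cs => c :: pvFirstRuns (cs.filter (fun x => x ≠ c))
termination_by seq => seq.length
decreasing_by
  simp only [List.length_cons]
  refine Nat.lt_succ_of_le ?_
  have h := List.length_filter_le (fun x : {x // x ∈ cs} => decide (↑x ≠ c)) cs.attach
  simp at h ⊢
  omega

lemma firstRunsLoop_eq_aux : ∀ (n : Nat) (xs out : List String), xs.length ≤ n →
    pvFirstRunsLoop out xs = out ++ pvFirstRuns xs := by
  intro n
  induction n with
  | zero =>
    intro xs out h
    rw [List.length_eq_zero_iff.mp (Nat.le_zero.mp h)]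
    simp [pvFirstRunsLoop, pvFirstRuns]
  | succ n ih =>
    intro xs out h
    match xs with
    | [] => simp [pvFirstRunsLoop, pvFirstRuns]
    | c :: cs =>
      rw [pvFirstRunsLoop, pvFirstRuns,
        ih _ _ (le_trans (List.length_filter_le _ _) (by simpa using Nat.le_of_succ_le_succ h))]
      simp

lemma firstRunsLoop_eq (xs out : List String) : pvFirstRunsLoop out xs = out ++ pvFirstRuns xs :=
  firstRunsLoop_eq_aux xs.length xs out le_rfl

-- ordered dedup relative to an already-seen list: the invariant of A's loop
def pvFd : List String → List String → List String
  | _, [] => []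
  | seen, c :: cs => if c ∈ seen then pvFd seen cs else c :: pvFd (seen ++ [c]) cs

-- pvFd over a seen-list equals first_runs of the stream with seen elements removed
lemma fd_eq_firstRuns : ∀ (xs seen : List String),
    pvFd seen xs = pvFirstRuns (xs.filter (fun c => c ∉ seen)) := by
  intro xs
  induction xs with
  | nil => intro seen; simp [pvFd, pvFirstRuns]
  | cons c cs ih =>
    intro seen
    by_cases h : c ∈ seen
    · simp [pvFd, h, ih]
    · rw [pvFd, if_neg h]
      simp only [List.filter_cons, decide_not, h, decide_false, Bool.not_false, if_true]
      rw [pvFirstRuns, ih (seen ++ [c]), List.filter_filter]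
      congr 2
      apply List.filter_congr
      intro x _
      by_cases hx : x = c <;> by_cases hxs : x ∈ seen <;> simp [hx, hxs]

lemma collectA_eq (limit : Int) :
    ∀ (values : List (Option String)) (seen : List String),
      (seen.length : Int) < limit →
      collectA limit seen values = seen ++ (pvFd seen (pvStream values)).take (limit.toNat - seen.length) := by
  intro values
  induction values with
  | nil => intro seen _; simp [collectA, pvStream, pvFd]
  | cons v rest ih =>
    intro seen hlt
    by_cases hv : v.getD "" = ""
    · have hstream : pvStream (v :: rest) = pvStream rest := by
        simp [pvStream, hv]
      rw [hstream]
      simpa [collectA, hv] using ih seen hlt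
    · set c := pvClean (v.getD "") with hc
      have hstream : pvStream (v :: rest)
          = if c ≠ "" then c :: pvStream rest else pvStream rest := by
        simp [pvStream, List.filter_cons, hv, hc]
      by_cases hce : c = ""
      · -- cleaned empty: nothing appended, no break (seen.length < limit)
        have : collectA limit seen (v :: rest) = collectA limit seen rest := by
          simp [collectA, hv, ← hc, hce, not_le.mpr hlt]
        rw [this, hstream]
        simpa [hce] using ih seen hlt
      · by_cases hmem : c ∈ seen
        · -- duplicate: nothing appended, no break
          have : collectA limit seen (v :: rest) = collectA limit seen rest := by
            simp [collectA, hv, ← hc, hmem, not_le.mpr hlt]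
          rw [this, hstream]
          simp only [hce, ne_eq, not_false_iff, if_true]
          rw [pvFd, if_pos hmem]
          exact ih seen hlt
        · -- new element appended
          have hfd : pvFd seen (c :: pvStream rest) = c :: pvFd (seen ++ [c]) (pvStream rest) := by
            rw [pvFd, if_neg hmem]
          by_cases hbrk : ((seen ++ [c]).length : Int) ≥ limit
          · -- break: seen.length + 1 = limit
            have hb : limit ≤ (seen.length : Int) + 1 := by simpa using hbrk
            have h1 : limit.toNat - seen.length = 1 := by omega
            have : collectA limit seen (v :: rest) = seen ++ [c] := by
              simp [collectA, hv, ← hc, hce, hmem, hb]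
            rw [this, hstream]
            simp [hce, hfd, h1]
          · -- continue with seen ++ [c]
            have hlen : ((seen ++ [c]).length : Int) < limit := lt_of_not_ge hbrk
            have hb : ¬ limit ≤ (seen.length : Int) + 1 := by
              simp only [List.length_append, List.length_cons, List.length_nil] at hbrk; omega
            have : collectA limit seen (v :: rest) = collectA limit (seen ++ [c]) rest := by
              simp [collectA, hv, ← hc, hce, hmem, hb]
            rw [this, ih (seen ++ [c]) hlen, hstream]
            simp only [hce, ne_eq, not_false_iff, if_true, hfd]
            have harith : limit.toNat - seen.length = (limit.toNat - (seen ++ [c]).length) + 1 := by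
              simp only [List.length_append, List.length_cons, List.length_nil] at hlen ⊢
              omega
            rw [harith, List.take_succ_cons]
            simp

lemma collectA_nil_of_all_empty (limit : Int) :
    ∀ values : List (Option String), (∀ v ∈ values, pvClean (v.getD "") = "") →
      collectA limit [] values = [] := by
  intro values
  induction values with
  | nil => intro _; simp [collectA]
  | cons v rest ih =>
    intro h
    have hrest := ih (fun x hx => h x (List.mem_cons_of_mem _ hx))
    by_cases hv : v.getD "" = ""
    · simp [collectA, hv, hrest]
    · have hce : pvClean (v.getD "") = "" := h v List.mem_cons_self
      by_cases hb : limit ≤ (0 : Int) <;> simp [collectA, hv, hce, hb, hrest]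

lemma stream_nil_of_all_empty (values : List (Option String))
    (h : ∀ v ∈ values, pvClean (v.getD "") = "") : pvStream values = [] := by
  simp only [pvStream, List.filter_eq_nil_iff]
  intro a ha
  obtain ⟨v, hv, rfl⟩ := List.mem_map.mp ha
  simp [h v (List.mem_of_mem_filter hv)]

-- ===== VERDICT (by name: the statement is the Claim_ definition above) =====
theorem collect_url_values_py_spec : Claim_equal_collect_url_values_py := by
  intro values limit _ hpre
  rcases hpre with hpre | hall
  case inr =>
    unfold Spec_collect_url_values_py collect_url_values_py
    simp only [collect_url_values_py_alt]
    have hs : pvStream values = [] := stream_nil_of_all_empty values hall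
    simp only [pvStream] at hs
    rw [collectA_nil_of_all_empty limit values hall, hs]
    simp [pvFirstRunsLoop, PySem.List.slice]
  have h0 : ((([] : List String).length : Int)) < limit := by
    simpa using lt_of_lt_of_le (by norm_num) hpre
  unfold Spec_collect_url_values_py collect_url_values_py
  simp only [collect_url_values_py_alt]
  rw [collectA_eq limit values [] h0]
  rw [firstRunsLoop_eq, fd_eq_firstRuns (pvStream values) [],
      PySem.List.slice_to _ (le_trans (by norm_num) hpre)]
  simp [pvStream]
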